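-- pv_equiv track=rewrite | github.com/cam-x/Python-exercises | pythonchallenge/challenge1.py | letter_change
-- ===== SOURCE A (Python) =====
-- def letter_change(sentence):
--     new_sentence=[]
--     alphabet = 'abcdefghijklmnopqrstuvwxyz'
--     alphabet_list = sorted(list(alphabet))
--     for letter in sentence:
--         if letter in alphabet_list:
--             if letter == 'x':
--                 new_sentence.append('z')
--             elif letter == 'y':
--                 new_sentence.append('a')
--             elif letter == 'z':
--                 new_sentence.append('b')
--             else:
--                 new_sentence.append(alphabet_list[alphabet_list.index(letter) + 2])
--         else:
--             new_sentence.append(letter)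
--     return new_sentence
-- ===== SOURCE B (Python) =====
-- def letter_change(sentence):
--     # Stage 1: lower everything to code points.
--     codes = [ord(ch) for ch in sentence]
--     # Stage 2: pure arithmetic on code points: rotate the 26-slot window by 2.
--     shifted = [(o - 97 + 2) % 26 + 97 if 97 <= o <= 122 else o for o in codes]
--     # Stage 3: back to characters.
--     return [chr(o) for o in shifted]
-- ===== Notes on version B (the rewrite author's own statement) =====
-- stated objective: alternative
-- what changed: Works on code points instead of characters: three staged passes (ord, a pure (o-97+2)%26+97 rotation on the numeric range 97..122, chr) replace A's single pass with a sorted alphabet list, membership test, .index() scan and x/y/z special-case branch chain; no table or list is searched at all.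
import Mathlib
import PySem

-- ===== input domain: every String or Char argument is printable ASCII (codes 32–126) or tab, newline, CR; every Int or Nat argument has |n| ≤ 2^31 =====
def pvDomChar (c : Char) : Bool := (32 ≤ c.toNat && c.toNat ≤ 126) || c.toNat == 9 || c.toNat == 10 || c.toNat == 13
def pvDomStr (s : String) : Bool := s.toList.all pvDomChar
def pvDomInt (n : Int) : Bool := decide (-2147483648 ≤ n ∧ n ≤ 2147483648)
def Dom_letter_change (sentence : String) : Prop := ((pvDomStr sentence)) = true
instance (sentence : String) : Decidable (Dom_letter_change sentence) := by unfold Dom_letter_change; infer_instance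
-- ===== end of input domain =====

-- B works on code points (ord / +2 mod 26 arithmetic on the range 97..122 / chr) in three staged
-- passes, replacing A's sorted-list membership test, .index() scan and x/y/z branch chain
-- (objective: alternative).

-- ===== PORT A =====
-- literal port of A: sorted alphabet list, membership test, x/y/z branches, .index()+2 lookup.
-- The .getD totalizations of index?/pyGet? are unreachable: they fire only when the letter is
-- in the alphabet list, where Python's .index and [] cannot raise.
def letter_change (sentence : String) : List String :=
  let alphabet_list := PySem.List.sorted ("abcdefghijklmnopqrstuvwxyz".toList) (fun x => x) false
  sentence.toList.foldl (fun new_sentence letter =>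
    if letter ∈ alphabet_list then
      if letter = 'x' then new_sentence ++ ["z"]
      else if letter = 'y' then new_sentence ++ ["a"]
      else if letter = 'z' then new_sentence ++ ["b"]
      else new_sentence ++
        [((PySem.List.pyGet? alphabet_list
            (((PySem.List.index? alphabet_list letter).getD 0 : Int) + 2)).getD letter).toString]
    else new_sentence ++ [letter.toString]) []

-- ===== PORT B =====
-- codes = [ord(ch) for ch in sentence]
-- shifted = [(o - 97 + 2) % 26 + 97 if 97 <= o <= 122 else o for o in codes]
-- return [chr(o) for o in shifted]
def letter_change_alt (sentence : String) : List String :=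
  let codes := sentence.toList.map (fun ch => (ch.toNat : Int))
  let shifted := codes.map (fun o =>
    if 97 ≤ o ∧ o ≤ 122 then PySem.Int.mod (o - 97 + 2) 26 + 97 else o)
  shifted.map (fun o => (Char.ofNat o.toNat).toString)

-- ===== PRECONDITION & SPEC =====
def Spec_letter_change (sentence : String) (out : List String) : Prop := out = letter_change_alt sentence
instance (sentence : String) (out : List String) : Decidable (Spec_letter_change sentence out) := by unfold Spec_letter_change; infer_instance

-- ===== CLAIM (what is proved, stated in full; the proofs are below) =====
def Claim_equal_letter_change : Prop := ∀ (sentence : String), Dom_letter_change sentence → Spec_letter_change sentence (letter_change sentence)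

-- ===== LEMMAS AND PROOFS =====

def lcAlpha : List Char := ['a', 'b', 'c', 'd', 'e', 'f', 'g', 'h', 'i', 'j', 'k', 'l', 'm', 'n', 'o', 'p', 'q', 'r', 's', 't', 'u', 'v', 'w', 'x', 'y', 'z']

-- A's per-letter value
def lcF (letter : Char) : String :=
  if letter ∈ lcAlpha then
    if letter = 'x' then "z"
    else if letter = 'y' then "a"
    else if letter = 'z' then "b"
    else ((PySem.List.pyGet? lcAlpha
            (((PySem.List.index? lcAlpha letter).getD 0 : Int) + 2)).getD letter).toString
  else letter.toString

-- B's per-letter value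
def lcG (ch : Char) : String :=
  (Char.ofNat (if 97 ≤ (ch.toNat : Int) ∧ (ch.toNat : Int) ≤ 122 then
      PySem.Int.mod ((ch.toNat : Int) - 97 + 2) 26 + 97 else (ch.toNat : Int)).toNat).toString

lemma lcSorted_eq : PySem.List.sorted ("abcdefghijklmnopqrstuvwxyz".toList) (fun x => x) false = lcAlpha := by
  decide

lemma lcFoldlA (cs : List Char) (acc : List String) :
    cs.foldl (fun new_sentence letter =>
      if letter ∈ lcAlpha then
        if letter = 'x' then new_sentence ++ ["z"]
        else if letter = 'y' then new_sentence ++ ["a"]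
        else if letter = 'z' then new_sentence ++ ["b"]
        else new_sentence ++
          [((PySem.List.pyGet? lcAlpha
              (((PySem.List.index? lcAlpha letter).getD 0 : Int) + 2)).getD letter).toString]
      else new_sentence ++ [letter.toString]) acc
    = acc ++ cs.map lcF := by
  induction cs generalizing acc with
  | nil => simp
  | cons c cs ih =>
    have hstep : (if c ∈ lcAlpha then
        if c = 'x' then acc ++ ["z"]
        else if c = 'y' then acc ++ ["a"]
        else if c = 'z' then acc ++ ["b"]
        else acc ++
          [((PySem.List.pyGet? lcAlpha
              (((PySem.List.index? lcAlpha c).getD 0 : Int) + 2)).getD c).toString]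
      else acc ++ [c.toString]) = acc ++ [lcF c] := by
      unfold lcF; split_ifs <;> rfl
    simp only [List.foldl, hstep, ih, List.map]
    simp

lemma lc_mem_of_range (c : Char) (h1 : 97 ≤ c.toNat) (h2 : c.toNat ≤ 122) : c ∈ lcAlpha := by
  have hc : Char.ofNat c.toNat = c := Char.ofNat_toNat c
  set n := c.toNat with hn
  interval_cases n <;> (rw [← hc]; decide)

lemma lcPoint (c : Char) : lcF c = lcG c := by
  by_cases hc : c ∈ lcAlpha
  · simp only [lcAlpha, List.mem_cons, List.not_mem_nil, or_false] at hc
    rcases hc with h | h | h | h | h | h | h | h | h | h | h | h | h | h | h | h | h | h | h | h | h | h | h | h | h | h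
    all_goals subst h
    all_goals decide
  · have hrange : ¬ (97 ≤ (c.toNat : Int) ∧ (c.toNat : Int) ≤ 122) := by
      intro ⟨h1, h2⟩
      exact hc (lc_mem_of_range c (by exact_mod_cast h1) (by exact_mod_cast h2))
    rw [lcF, if_neg hc, lcG, if_neg hrange]
    simp [Char.ofNat_toNat]

-- ===== VERDICT (by name: the statement is the Claim_ definition above) =====
theorem letter_change_spec : Claim_equal_letter_change := by
  intro s _
  unfold Spec_letter_change letter_change letter_change_alt
  rw [lcSorted_eq, lcFoldlA]
  simp only [List.map_map, List.nil_append]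
  exact List.map_congr_left (fun c _ => lcPoint c)
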